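-- pv_equiv track=rewrite | github.com/fionavatar/cuvilliez-project-se | src/overflow_compressor.py | nbBloccsOverflow
-- ===== SOURCE A (Python) =====
-- def nbBloccsOverflow(k1, nbOF):
--     """
--     Calcule le nombre exact de blocs de 32 bits nécessaires pour stocker nbOF entiers
--     de k1 bits chacun, sans crossing et avec padding à la fin de chaque bloc.
--     """
--     bits_used = 0
--     blocs = 1 if nbOF > 0 else 0
--     for _ in range(nbOF):
--         if bits_used + k1 > 32:
--             blocs += 1
--             bits_used = 0
--         bits_used += k1
--     return blocs
-- ===== SOURCE B (Python) =====
-- def nbBloccsOverflow(k1, nbOF):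
--     if nbOF <= 0:
--         return 0
--     if k1 <= 0:
--         return 1
--     if k1 > 32:
--         return 1 + nbOF
--     cap = 32 // k1
--     return (nbOF + cap - 1) // cap
-- ===== Notes on version B (the rewrite author's own statement) =====
-- stated objective: faster
-- what changed: Replaced A's per-element simulation loop over range(nbOF) with an O(1) closed form: 0 for nbOF<=0, 1 for k1<=0, 1+nbOF for k1>32, and ceil(nbOF / (32//k1)) otherwise.
import Mathlib
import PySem

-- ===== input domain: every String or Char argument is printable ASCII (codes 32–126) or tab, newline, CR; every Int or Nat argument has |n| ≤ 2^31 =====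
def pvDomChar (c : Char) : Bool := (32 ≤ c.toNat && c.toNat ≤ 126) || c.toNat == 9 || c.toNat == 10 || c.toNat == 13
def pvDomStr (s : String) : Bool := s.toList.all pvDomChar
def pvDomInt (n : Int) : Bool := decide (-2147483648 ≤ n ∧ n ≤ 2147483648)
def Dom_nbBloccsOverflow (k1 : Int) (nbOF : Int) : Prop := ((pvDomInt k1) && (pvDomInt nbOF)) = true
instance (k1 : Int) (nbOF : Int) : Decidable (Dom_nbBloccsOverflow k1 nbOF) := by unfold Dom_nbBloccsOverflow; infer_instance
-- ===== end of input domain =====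

-- B replaces A's O(nbOF) simulation loop with an O(1) closed form (ceiling division); proved equal on all inputs.

-- ===== PORT A =====
-- state (bits_used, blocs); the loop body is the Python's, step for step
def nbBloccsOverflow (k1 : Int) (nbOF : Int) : Int :=
  ((PySem.List.pyRange 0 nbOF 1).foldl
    (fun (st : Int × Int) _ =>
      if st.1 + k1 > 32 then (k1, st.2 + 1) else (st.1 + k1, st.2))
    (0, if nbOF > 0 then 1 else 0)).2

-- ===== PORT B =====
def nbBloccsOverflow_alt (k1 : Int) (nbOF : Int) : Int :=
  if nbOF ≤ 0 then 0
  else if k1 ≤ 0 then 1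
  else if k1 > 32 then 1 + nbOF
  else
    let cap := PySem.Int.floordiv 32 k1
    PySem.Int.floordiv (nbOF + cap - 1) cap

-- ===== PRECONDITION & SPEC =====
def Spec_nbBloccsOverflow (k1 : Int) (nbOF : Int) (out : Int) : Prop := out = nbBloccsOverflow_alt k1 nbOF
instance (k1 : Int) (nbOF : Int) (out : Int) : Decidable (Spec_nbBloccsOverflow k1 nbOF out) := by unfold Spec_nbBloccsOverflow; infer_instance

-- ===== CLAIM (what is proved, stated in full; the proofs are below) =====
def Claim_equal_nbBloccsOverflow : Prop := ∀ (k1 : Int) (nbOF : Int), Dom_nbBloccsOverflow k1 nbOF → Spec_nbBloccsOverflow k1 nbOF (nbBloccsOverflow k1 nbOF)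

-- ===== LEMMAS AND PROOFS =====

-- A's loop body as a named step function (it ignores the loop variable)
def pvStep (k1 : Int) (st : Int × Int) : Int × Int :=
  if st.1 + k1 > 32 then (k1, st.2 + 1) else (st.1 + k1, st.2)

theorem pv_foldl_const {α β : Type} (g : β → β) (l : List α) (init : β) :
    l.foldl (fun st _ => g st) init = g^[l.length] init := by
  induction l generalizing init with
  | nil => rfl
  | cons a t ih =>
    simp [List.foldl, ih, Function.iterate_succ_apply]

theorem pv_fold_eq (k1 nbOF : Int) :
    nbBloccsOverflow k1 nbOF
      = ((pvStep k1)^[nbOF.toNat] (0, if nbOF > 0 then 1 else 0)).2 := by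
  unfold nbBloccsOverflow
  rw [show (fun (st : Int × Int) (_ : Int) =>
        if st.1 + k1 > 32 then (k1, st.2 + 1) else (st.1 + k1, st.2))
      = (fun st _ => pvStep k1 st) from rfl]
  rw [pv_foldl_const, PySem.List.length_pyRange_one]
  simp

-- k1 ≤ 0 : the branch never fires, blocs stays 1
theorem pv_iter_nonpos (k1 : Int) (hk : k1 ≤ 0) (m : Nat) :
    (pvStep k1)^[m] ((0:Int), (1:Int)) = (k1 * m, 1) := by
  induction m with
  | zero => simp
  | succ m ih =>
    rw [Function.iterate_succ_apply', ih]
    have h1 : k1 * (m:Int) ≤ 0 := mul_nonpos_of_nonpos_of_nonneg hk (by positivity)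
    unfold pvStep
    rw [if_neg (by simp only []; omega)]
    simp; ring

-- k1 > 32 : every iteration increments blocs
theorem pv_iter_big (k1 : Int) (hk : 32 < k1) (m : Nat) (hm : 1 ≤ m) :
    (pvStep k1)^[m] ((0:Int), (1:Int)) = (k1, 1 + (m:Int)) := by
  induction m with
  | zero => omega
  | succ m ih =>
    rcases Nat.eq_or_lt_of_le hm with h1 | h1
    · simp [← h1, pvStep]; omega
    · rw [Function.iterate_succ_apply', ih (by omega)]
      unfold pvStep
      rw [if_pos (by simp only []; omega)]
      simp; ring

-- 1 ≤ K ≤ 32 : after m ≥ 1 steps, state = (K * ((m-1) % cap + 1), (m-1) / cap + 1), cap = 32 / K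
theorem pv_iter_mid (K : Nat) (hK1 : 1 ≤ K) (hK32 : K ≤ 32) (m : Nat) (hm : 1 ≤ m) :
    (pvStep (K:Int))^[m] ((0:Int), (1:Int))
      = (((K * ((m - 1) % (32 / K) + 1) : Nat) : Int), (((m - 1) / (32 / K) + 1 : Nat) : Int)) := by
  have hcap : 0 < 32 / K := Nat.div_pos hK32 (by omega)
  induction m with
  | zero => omega
  | succ m ih =>
    rcases Nat.eq_or_lt_of_le hm with h1 | h1
    · -- m + 1 = 1 : first iteration, condition 0 + K > 32 is false
      have hm0 : m = 0 := by omega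
      subst hm0
      rw [Function.iterate_one]
      unfold pvStep
      rw [if_neg (by simp only []; push_cast; omega)]
      simp
    · -- inductive step from m ≥ 1
      rw [Function.iterate_succ_apply', ih (by omega)]
      set cap := 32 / K with hcapdef
      set e := (m - 1) % cap with hedef
      set d := (m - 1) / cap with hddef
      have he : e < cap := Nat.mod_lt _ hcap
      have hdm : cap * d + e = m - 1 := Nat.div_add_mod (m - 1) cap
      by_cases hfull : e + 1 = cap
      · -- block full: condition fires
        have hmeq : m = cap * (d + 1) := by rw [Nat.mul_add, Nat.mul_one]; omega
        have hlt : 32 < (e + 2) * K := by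
          have := (Nat.div_lt_iff_lt_mul (by omega : 0 < K)).mp
            (show 32 / K < e + 2 by omega)
          omega
        unfold pvStep
        rw [if_pos (by simp only []; push_cast; nlinarith)]
        have h1 : (m + 1 - 1) % cap = 0 := by rw [show m + 1 - 1 = m from rfl, hmeq]; exact Nat.mul_mod_right _ _
        have h2 : (m + 1 - 1) / cap = d + 1 := by
          rw [show m + 1 - 1 = m from rfl, hmeq]; exact Nat.mul_div_cancel_left _ hcap
        rw [h1, h2]
        simp only [Prod.mk.injEq]
        constructor <;> push_cast <;> ring
      · -- room left in the block
        have hroom : e + 2 ≤ cap := by omega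
        have hle : (e + 2) * K ≤ 32 := by
          have := (Nat.le_div_iff_mul_le (by omega : 0 < K)).mp
            (show e + 2 ≤ 32 / K from hroom)
          omega
        unfold pvStep
        rw [if_neg (by simp only []; push_cast; nlinarith)]
        have hmeq : m = cap * d + (e + 1) := by omega
        have h1 : (m + 1 - 1) % cap = e + 1 := by
          rw [show m + 1 - 1 = m from rfl, hmeq, Nat.mul_add_mod]
          exact Nat.mod_eq_of_lt (by omega)
        have h2 : (m + 1 - 1) / cap = d := by
          rw [show m + 1 - 1 = m from rfl, hmeq, Nat.mul_add_div hcap]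
          rw [Nat.div_eq_of_lt (by omega)]
          omega
        rw [h1, h2]
        simp only [Prod.mk.injEq]
        constructor <;> push_cast <;> ring

-- ===== VERDICT (by name: the statement is the Claim_ definition above) =====
theorem nbBloccsOverflow_spec : Claim_equal_nbBloccsOverflow := by
  intro k1 nbOF _
  unfold Spec_nbBloccsOverflow nbBloccsOverflow_alt
  by_cases hn : nbOF ≤ 0
  · -- empty loop
    rw [pv_fold_eq, if_pos hn]
    have : nbOF.toNat = 0 := by omega
    rw [this]
    simp; omega
  · have hngt : nbOF > 0 := by omega
    obtain ⟨n, hn1, hneq⟩ : ∃ n : Nat, 1 ≤ n ∧ nbOF = (n : Int) :=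
      ⟨nbOF.toNat, by omega, by omega⟩
    rw [if_neg (by omega)]
    rw [pv_fold_eq, if_pos hngt, show nbOF.toNat = n by omega]
    by_cases hk0 : k1 ≤ 0
    · rw [if_pos hk0, pv_iter_nonpos k1 hk0]
    · rw [if_neg hk0]
      by_cases hkbig : k1 > 32
      · rw [if_pos hkbig, pv_iter_big k1 hkbig n hn1]
        simp [hneq]
      · rw [if_neg hkbig]
        obtain ⟨K, hK1, hK32, hKeq⟩ : ∃ K : Nat, 1 ≤ K ∧ K ≤ 32 ∧ k1 = (K : Int) :=
          ⟨k1.toNat, by omega, by omega, by omega⟩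
        subst hKeq
        rw [pv_iter_mid K hK1 hK32 n hn1]
        have hcap : 0 < 32 / K := Nat.div_pos hK32 (by omega)
        have h32 : PySem.Int.floordiv 32 (K : Int) = ((32 / K : Nat) : Int) := by
          exact_mod_cast PySem.Int.floordiv_natCast 32 K
        simp only [h32, hneq]
        have harg : (n : Int) + ((32 / K : Nat) : Int) - 1 = (((n - 1) + 32 / K : Nat) : Int) := by
          push_cast; omega
        rw [harg]
        have := PySem.Int.floordiv_natCast ((n - 1) + 32 / K) (32 / K)
        rw [this, Nat.add_div_right _ hcap]
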